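-- pv_equiv track=rewrite | github.com/kmogilevskii/DE_projects | Apache_Beam/Batch_Pipeline_Bank/batch_dataflow.py | calc_num_defaults
-- ===== SOURCE A (Python) =====
-- def calc_num_defaults(record):
--     key, months = record
--     months = list(months) # https://stackoverflow.com/questions/41892701/beam-dataflow-python-attributeerror-unwindowedvalues-object-has-no-attribut
--     months.sort(reverse=False)
--     max_total_defaults = 4
--     max_consecutive_defaults = 2
--     total_defaults = 12 - len(months)
--
--     if total_defaults >= max_total_defaults:
--         return key, total_defaults
--
--     consecutive_defaults = 0
--     tmp = months[0] - 1
--     if tmp > consecutive_defaults: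
--         consecutive_defaults = tmp
--
--     tmp = 12 - months[-1]
--     if tmp > consecutive_defaults:
--         consecutive_defaults = tmp
--
--     for i in range(1, len(months)):
--         tmp = months[i] - months[i - 1] - 1
--         if tmp > consecutive_defaults:
--             consecutive_defaults = tmp
--
--     return key, consecutive_defaults
-- ===== SOURCE B (Python) =====
-- def calc_num_defaults(record):
--     key, months = record
--     total_defaults = 12 - len(months)
--     if total_defaults >= 4:
--         return key, total_defaults
--     present = set(months)
--     run = 0
--     best = 0
--     for month in range(1, 13):
--         if month in present:
--             run = 0
--         else:
--             run += 1
--             if run > best: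
--                 best = run
--     return key, best
-- ===== Notes on version B (the rewrite author's own statement) =====
-- stated objective: idiomatic
-- what changed: Replaces A's sort-then-three-phase gap scan (leading gap, trailing gap, adjacent-difference loop over the sorted list) with a membership-set sweep over the twelve month slots that keeps a running count of consecutive absent months and its maximum.
-- outside the precondition, e.g. on calc_num_defaults(('k', [50, 1, 2, 3, 4, 5, 6, 7, 8])): A returns ('k', 41), B returns ('k', 4)
import Mathlib
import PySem

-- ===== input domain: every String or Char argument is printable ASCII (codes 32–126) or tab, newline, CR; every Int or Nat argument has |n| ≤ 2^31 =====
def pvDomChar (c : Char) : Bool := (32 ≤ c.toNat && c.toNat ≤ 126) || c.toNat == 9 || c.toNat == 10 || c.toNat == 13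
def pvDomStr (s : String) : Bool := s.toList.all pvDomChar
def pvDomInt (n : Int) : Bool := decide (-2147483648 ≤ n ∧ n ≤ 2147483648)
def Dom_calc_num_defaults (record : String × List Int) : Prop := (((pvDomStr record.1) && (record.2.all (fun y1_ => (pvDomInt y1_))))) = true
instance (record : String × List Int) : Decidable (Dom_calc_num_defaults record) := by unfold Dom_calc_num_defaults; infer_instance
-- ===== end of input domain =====

-- B replaces A's sort-then-gap-scan with a presence-set sweep over the 12 month slots (idiomatic; return value only — A sorts a local copy, no caller-visible mutation).

-- ===== PORT A =====
def calc_num_defaults (record : String × List Int) : String × Int :=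
  let key := record.1
  -- months = list(record[1]); months.sort(reverse=False)
  let months := PySem.List.sorted record.2 (fun x => x) false
  let total_defaults : Int := 12 - (months.length : Int)
  if total_defaults ≥ 4 then (key, total_defaults)
  else
    let consecutive_defaults : Int := 0
    let t1 := PySem.List.pyGetD months 0 0 - 1          -- months[0] (in range: length ≥ 9 here)
    let c1 := if t1 > consecutive_defaults then t1 else consecutive_defaults
    let t2 := 12 - PySem.List.pyGetD months (-1) 0      -- months[-1]
    let c2 := if t2 > c1 then t2 else c1
    let c3 := (PySem.List.pyRange 1 (months.length : Int) 1).foldl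
      (fun c i =>
        let tmp := PySem.List.pyGetD months i 0 - PySem.List.pyGetD months (i - 1) 0 - 1
        if tmp > c then tmp else c) c2
    (key, c3)

-- ===== PORT B =====
def calc_num_defaults_alt (record : String × List Int) : String × Int :=
  let key := record.1
  let months := record.2
  let total_defaults : Int := 12 - (months.length : Int)
  if total_defaults ≥ 4 then (key, total_defaults)
  else
    let present : PySem.Set Int := PySem.Set.ofList months
    let rb := (PySem.List.pyRange 1 13 1).foldl
      (fun rb month =>
        if PySem.Set.contains present month then ((0 : Int), rb.2)
        else (rb.1 + 1, if rb.1 + 1 > rb.2 then rb.1 + 1 else rb.2))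
      ((0 : Int), (0 : Int))
    (key, rb.2)

-- ===== PRECONDITION & SPEC =====
-- Pre_ restricts to the function's natural domain: whenever the gap scan runs (9 or more month
-- entries), every entry must be a real month number 1..12.  A still returns on out-of-range
-- entries, but its gap arithmetic then yields values that are not counts of missing months,
-- while B's 12-slot sweep returns the count over 1..12.
def Pre_calc_num_defaults (record : String × List Int) : Prop :=
  9 ≤ record.2.length → ∀ m ∈ record.2, 1 ≤ m ∧ m ≤ 12
instance (record : String × List Int) : Decidable (Pre_calc_num_defaults record) := by unfold Pre_calc_num_defaults; infer_instance

def pvWitness_calc_num_defaults : (String × List Int) := ("user1", [1, 2, 3, 5, 7, 8, 9, 11, 12])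

def Spec_calc_num_defaults (record : String × List Int) (out : String × Int) : Prop := out = calc_num_defaults_alt record
instance (record : String × List Int) (out : String × Int) : Decidable (Spec_calc_num_defaults record out) := by unfold Spec_calc_num_defaults; infer_instance

-- ===== CLAIM (what is proved, stated in full; the proofs are below) =====
def Claim_equal_calc_num_defaults : Prop := ∀ (record : String × List Int), Dom_calc_num_defaults record → Pre_calc_num_defaults record → Spec_calc_num_defaults record (calc_num_defaults record)

-- ===== LEMMAS AND PROOFS =====

-- Proof-side vocabulary: adjacent gaps of a list, A's max-gap value, duplicate removal on a
-- sorted list, and a specification of B's sweep.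
def pvGaps : List Int → List Int
  | x :: y :: t => (y - x - 1) :: pvGaps (y :: t)
  | _ => []

def pvAux : List Int → Int
  | [x] => 12 - x
  | x :: y :: t => max (y - x - 1) (pvAux (y :: t))
  | [] => 0

def pvStrip : Int → List Int → List Int
  | x, [] => [x]
  | x, y :: t => if y = x then pvStrip x t else x :: pvStrip y t

def pvSW : List Int → Int → Int → Int → Int
  | [], j, run, best => max best (run + 13 - j)
  | m :: u, j, run, best => pvSW u (m + 1) 0 (max best (run + (m - j)))

lemma pv_foldl_max_max (l : List Int) : ∀ a b, l.foldl max (max a b) = max a (l.foldl max b) := by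
  induction l with
  | nil => intro a b; rfl
  | cons c l ih =>
    intro a b
    simp only [List.foldl_cons]
    rw [max_assoc, ih]

lemma pvAux_last_le : ∀ (t : List Int) (x : Int),
    12 - (x :: t).getLast (List.cons_ne_nil x t) ≤ pvAux (x :: t) := by
  intro t
  induction t with
  | nil => intro x; simp [pvAux]
  | cons y t ih =>
    intro x
    have := ih y
    simp only [pvAux, List.getLast_cons (List.cons_ne_nil y t)] at *
    omega

-- A's index loop over range(1, len(s)) equals the max-fold over the adjacent-gap list.
lemma pv_getD_shift (x : Int) (r : List Int) (i : Int) (h : 0 ≤ i) :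
    PySem.List.pyGetD (x :: r) (i + 1) 0 = PySem.List.pyGetD r i 0 := by
  have e : i = ((i.toNat : Int)) := (Int.toNat_of_nonneg h).symm
  rw [e]
  have h1 : ((i.toNat : Int)) + 1 = ((i.toNat + 1 : Nat) : Int) := by push_cast; ring
  rw [h1, PySem.List.pyGetD_natCast, PySem.List.pyGetD_natCast, List.getD_cons_succ]

lemma pv_afold_eq : ∀ (s : List Int) (c : Int),
    (PySem.List.pyRange 1 (s.length : Int) 1).foldl
      (fun c i =>
        let tmp := PySem.List.pyGetD s i 0 - PySem.List.pyGetD s (i - 1) 0 - 1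
        if tmp > c then tmp else c) c
    = (pvGaps s).foldl max c := by
  intro s
  induction s with
  | nil => intro c; rw [PySem.List.pyRange_one_eq_nil (by simp)]; rfl
  | cons x s ih =>
    cases s with
    | nil => intro c; rw [PySem.List.pyRange_one_eq_nil (by simp)]; rfl
    | cons y t =>
      intro c
      have hlen : ((x :: y :: t).length : Int) = (t.length : Int) + 2 := by
        simp [List.length]; ring
      rw [hlen, PySem.List.pyRange_one_cons (by omega)]
      simp only [List.foldl_cons]
      -- first iteration: i = 1
      have hx : PySem.List.pyGetD (x :: y :: t) (1 : Int) 0 = y := by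
        have := pv_getD_shift x (y :: t) 0 le_rfl
        simpa [PySem.List.pyGetD_zero_cons] using this
      have hx0 : PySem.List.pyGetD (x :: y :: t) ((1 : Int) - 1) 0 = x := by
        norm_num [PySem.List.pyGetD_zero_cons]
      rw [hx, hx0]
      -- remaining range: shift indices down by one onto (y :: t)
      have hr2 : PySem.List.pyRange (1 + 1) ((t.length : Int) + 2) 1
          = (PySem.List.pyRange 1 ((t.length : Int) + 1) 1).map (· + 1) := by
        rw [PySem.List.pyRange_one, PySem.List.pyRange_one]
        have : ((t.length : Int) + 2 - (1 + 1)).toNat = ((t.length : Int) + 1 - 1).toNat := by omega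
        rw [this, List.map_map]
        apply List.map_congr_left
        intro k _
        simp; ring
      rw [hr2, List.foldl_map]
      have hfun : ∀ (c' : Int) (i : Int), 1 ≤ i →
          (PySem.List.pyGetD (x :: y :: t) (i + 1) 0 - PySem.List.pyGetD (x :: y :: t) (i + 1 - 1) 0 - 1)
          = (PySem.List.pyGetD (y :: t) i 0 - PySem.List.pyGetD (y :: t) (i - 1) 0 - 1) := by
        intro c' i hi
        have e1 : PySem.List.pyGetD (x :: y :: t) (i + 1) 0 = PySem.List.pyGetD (y :: t) i 0 :=
          pv_getD_shift x (y :: t) i (by omega)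
        have e2 : PySem.List.pyGetD (x :: y :: t) (i + 1 - 1) 0 = PySem.List.pyGetD (y :: t) (i - 1) 0 := by
          have : i + 1 - 1 = (i - 1) + 1 := by ring
          rw [this]
          exact pv_getD_shift x (y :: t) (i - 1) (by omega)
        rw [e1, e2]
      have hcongr : (PySem.List.pyRange 1 ((t.length : Int) + 1) 1).foldl
            (fun c' i => let tmp := PySem.List.pyGetD (x :: y :: t) (i + 1) 0 - PySem.List.pyGetD (x :: y :: t) (i + 1 - 1) 0 - 1
                         if tmp > c' then tmp else c')
            (if y - x - 1 > c then y - x - 1 else c)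
          = (PySem.List.pyRange 1 ((t.length : Int) + 1) 1).foldl
            (fun c' i => let tmp := PySem.List.pyGetD (y :: t) i 0 - PySem.List.pyGetD (y :: t) (i - 1) 0 - 1
                         if tmp > c' then tmp else c')
            (if y - x - 1 > c then y - x - 1 else c) := by
        refine PySem.List.foldl_congr_mem _ _ _ _ ?_
        intro acc i hi
        have h1 : 1 ≤ i := (PySem.List.mem_pyRange_one.1 hi).1
        rw [hfun acc i h1]
      rw [hcongr]
      have hlen2 : ((y :: t).length : Int) = (t.length : Int) + 1 := by simp
      have := ih (if y - x - 1 > c then y - x - 1 else c)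
      rw [hlen2] at this
      rw [this]
      have : (if y - x - 1 > c then y - x - 1 else c) = max c (y - x - 1) := by omega
      simp only [pvGaps, List.foldl_cons, this]


-- Prepending the 12-last term to the gap fold computes pvAux.
lemma pv_gapfold_eq : ∀ (t : List Int) (x c : Int),
    (pvGaps (x :: t)).foldl max (max c (12 - (x :: t).getLast (List.cons_ne_nil x t)))
    = max c (pvAux (x :: t)) := by
  intro t
  induction t with
  | nil => intro x c; simp [pvGaps, pvAux]
  | cons y t ih =>
    intro x c
    simp only [pvGaps, pvAux, List.foldl_cons, List.getLast_cons (List.cons_ne_nil y t)]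
    have h1 : max (max c (12 - (y :: t).getLast (List.cons_ne_nil y t))) (y - x - 1)
        = max (y - x - 1) (max c (12 - (y :: t).getLast (List.cons_ne_nil y t))) := by omega
    rw [h1, pv_foldl_max_max, ih]
    omega

lemma pvStrip_cons : ∀ (t : List Int) (x : Int), ∃ w, pvStrip x t = x :: w := by
  intro t
  induction t with
  | nil => intro x; exact ⟨[], rfl⟩
  | cons y t ih =>
    intro x
    by_cases h : y = x
    · simpa [pvStrip, h] using ih x
    · exact ⟨pvStrip y t, by simp [pvStrip, h]⟩

lemma pv_mem_strip : ∀ (t : List Int) (x m : Int), m ∈ pvStrip x t ↔ m ∈ x :: t := by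
  intro t
  induction t with
  | nil => intro x m; simp [pvStrip]
  | cons y t ih =>
    intro x m
    by_cases h : y = x
    · subst h
      simp only [pvStrip, if_true]
      rw [ih]
      simp
    · simp only [pvStrip, h, if_false]
      simp [ih]

lemma pv_pairwise_strip : ∀ (t : List Int) (x : Int),
    (x :: t).Pairwise (· ≤ ·) → (pvStrip x t).Pairwise (· < ·) := by
  intro t
  induction t with
  | nil => intro x _; simp [pvStrip]
  | cons y t ih =>
    intro x hp
    rcases List.pairwise_cons.1 hp with ⟨hxall, hyt⟩
    by_cases h : y = x
    · subst h
      simp only [pvStrip]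
      refine ih y ?_
      refine List.pairwise_cons.2 ⟨?_, (List.pairwise_cons.1 hyt).2⟩
      intro m hm
      exact hxall m (List.mem_cons_of_mem y hm)
    · simp only [pvStrip, h, if_false]
      refine List.pairwise_cons.2 ⟨?_, ih y hyt⟩
      intro m hm
      have hm' := (pv_mem_strip t y m).1 hm
      have hxy : x ≤ y := hxall y (by simp)
      have hxy' : x < y := lt_of_le_of_ne hxy (fun e => h e.symm)
      rcases List.mem_cons.1 hm' with rfl | hmt
      · omega
      · have : y ≤ m := (List.pairwise_cons.1 hyt).1 m hmt
        omega

lemma pvAux_strip : ∀ (t : List Int) (x : Int),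
    (x :: t).Pairwise (· ≤ ·) → (∀ m ∈ x :: t, m ≤ 12) →
    pvAux (x :: t) = pvAux (pvStrip x t) := by
  intro t
  induction t with
  | nil => intro x _ _; simp [pvStrip]
  | cons y t ih =>
    intro x hp hb
    rcases List.pairwise_cons.1 hp with ⟨hxall, hyt⟩
    by_cases h : y = x
    · subst h
      simp only [pvStrip]
      have hge : 0 ≤ pvAux (y :: t) := by
        have h1 := pvAux_last_le t y
        have h2 : (y :: t).getLast (List.cons_ne_nil y t) ≤ 12 :=
          hb _ (List.mem_cons_of_mem y (List.getLast_mem (List.cons_ne_nil y t)))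
        omega
      have hdup : pvAux (y :: y :: t) = pvAux (y :: t) := by
        simp only [pvAux]; omega
      rw [hdup]
      refine ih y ?_ ?_
      · refine List.pairwise_cons.2 ⟨?_, (List.pairwise_cons.1 hyt).2⟩
        intro m hm
        exact hxall m (List.mem_cons_of_mem y hm)
      · intro m hm
        exact hb m (List.mem_cons_of_mem y hm)
    · simp only [pvStrip, h, if_false]
      rcases pvStrip_cons t y with ⟨w, hw⟩
      have ihy := ih y hyt (fun m hm => hb m (List.mem_cons_of_mem x hm))
      rw [hw] at ihy ⊢
      simp only [pvAux] at *
      omega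

-- B's sweep over months 1..12 computes pvSW of any strictly increasing list u that
-- represents the presence predicate p on 1..12.
lemma pv_sweep_spec : ∀ (n : Nat) (j run best : Int) (u : List Int) (p : Int → Bool),
    (13 - j).toNat = n → j ≤ 13 → 0 ≤ run → run ≤ best →
    u.Pairwise (· < ·) → (∀ m ∈ u, j ≤ m ∧ m ≤ 12) →
    (∀ t : Int, j ≤ t → t ≤ 12 → (p t = true ↔ t ∈ u)) →
    ((PySem.List.pyRange j 13 1).foldl
       (fun rb month =>
         if p month then ((0 : Int), rb.2)
         else (rb.1 + 1, if rb.1 + 1 > rb.2 then rb.1 + 1 else rb.2))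
       (run, best)).2 = pvSW u j run best := by
  intro n
  induction n with
  | zero =>
    intro j run best u p hn hj hr hrb hpw hb hp
    have hj13 : j = 13 := by omega
    subst hj13
    rw [PySem.List.pyRange_one_eq_nil (by omega)]
    cases u with
    | nil => simp [pvSW]; omega
    | cons m u' => exact absurd (hb m (by simp)) (by omega)
  | succ n ih =>
    intro j run best u p hn hj hr hrb hpw hb hp
    have hj12 : j ≤ 12 := by omega
    rw [PySem.List.pyRange_one_cons (by omega), List.foldl_cons]
    by_cases hpj : p j = true
    · -- j is a present month: u must start with j
      have hju : j ∈ u := (hp j le_rfl hj12).1 hpj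
      cases u with
      | nil => simp at hju
      | cons m u' =>
        have hm : m = j := by
          rcases List.mem_cons.1 hju with h | h
          · omega
          · have h1 := (List.pairwise_cons.1 hpw).1 j h
            have h2 := (hb m (by simp)).1
            omega
        subst hm
        simp only [hpj, if_true]
        have := ih (m + 1) 0 best u' p (by omega) (by omega) le_rfl (by omega)
          (List.pairwise_cons.1 hpw).2
          (by intro m' hm'
              have h1 := (List.pairwise_cons.1 hpw).1 m' hm'
              have h2 := hb m' (List.mem_cons_of_mem m hm')
              omega)
          (by intro t ht ht12
              rw [hp t (by omega) ht12]
              constructor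
              · intro h; rcases List.mem_cons.1 h with h | h
                · omega
                · exact h
              · intro h; exact List.mem_cons_of_mem m h)
        rw [this]
        simp only [pvSW]
        have : max best (run + (m - m)) = best := by omega
        rw [this]
    · -- j is absent
      have hju : j ∉ u := fun h => hpj ((hp j le_rfl hj12).2 h)
      simp only [hpj, Bool.false_eq_true, if_false]
      have hstep : (if run + 1 > best then run + 1 else best) = max best (run + 1) := by omega
      rw [hstep]
      have := ih (j + 1) (run + 1) (max best (run + 1)) u p (by omega) (by omega) (by omega) (by omega)
        hpw
        (by intro m hm
            have h1 := hb m hm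
            have : m ≠ j := fun e => hju (e ▸ hm)
            omega)
        (by intro t ht ht12; exact hp t (by omega) ht12)
      rw [this]
      -- pvSW shift: absorbing one absent slot
      cases u with
      | nil =>
        simp only [pvSW]; omega
      | cons m u' =>
        simp only [pvSW]
        have h1 := (hb m (by simp)).1
        have hmj : m ≠ j := fun e => hju (by simp [e])
        have : max (max best (run + 1)) (run + 1 + (m - (j + 1))) = max best (run + (m - j)) := by omega
        rw [this]

-- pvSW of a nonempty list in closed form.
lemma pvSW_closed : ∀ (u : List Int) (x j run best : Int),
    pvSW (x :: u) j run best = max best (max (run + (x - j)) (pvAux (x :: u))) := by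
  intro u
  induction u with
  | nil => intro x j run best; simp only [pvSW, pvAux]; omega
  | cons y t ih =>
    intro x j run best
    simp only [pvSW, pvAux] at *
    rw [ih]
    omega

lemma pv_contains_ofList (xs : List Int) (t : Int) :
    PySem.Set.contains (PySem.Set.ofList xs) t = true ↔ t ∈ xs := by
  simp [PySem.Set.contains, PySem.Set.mem_ofList]

-- fewer than 9 months: both programs return total_defaults = 12 - len(months).
lemma pv_easy (key : String) (months : List Int) (h : months.length ≤ 8) :
    calc_num_defaults (key, months) = calc_num_defaults_alt (key, months) := by
  simp only [calc_num_defaults, calc_num_defaults_alt]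
  rw [PySem.List.length_sorted]
  rw [if_pos (by omega), if_pos (by omega)]

-- 9 or more months, all in 1..12: A's max gap over the sorted list equals B's sweep maximum.
lemma pv_hard (key : String) (months : List Int) (hn : 9 ≤ months.length)
    (hb : ∀ m ∈ months, 1 ≤ m ∧ m ≤ 12) :
    calc_num_defaults (key, months) = calc_num_defaults_alt (key, months) := by
  simp only [calc_num_defaults, calc_num_defaults_alt]
  have hlen : (PySem.List.sorted months (fun x => x) false).length = months.length :=
    PySem.List.length_sorted months (fun x => x) false
  have hA : ¬ ((12 : Int) - ((PySem.List.sorted months (fun x => x) false).length : Int) ≥ 4) := by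
    rw [hlen]; omega
  have hB : ¬ ((12 : Int) - (months.length : Int) ≥ 4) := by omega
  rw [if_neg hA, if_neg hB]
  simp only [Prod.mk.injEq, true_and]
  -- name the sorted list and expose its head
  obtain ⟨x, t, hst⟩ : ∃ x t, PySem.List.sorted months (fun x => x) false = x :: t := by
    cases hseq : PySem.List.sorted months (fun x => x) false with
    | nil => exfalso; rw [hseq] at hlen; simp at hlen; omega
    | cons a b => exact ⟨a, b, rfl⟩
  have hmem : ∀ m : Int, m ∈ x :: t ↔ m ∈ months := by
    intro m; rw [← hst]; exact PySem.List.mem_sorted months (fun x : Int => x) false m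
  have hpw : (x :: t).Pairwise (· ≤ ·) := by
    have h0 : List.Pairwise (fun a b : Int => a ≤ b) (PySem.List.sorted months (fun x => x) false) :=
      PySem.List.sorted_pairwise months (fun x => x)
    rw [hst] at h0
    exact h0
  have hb' : ∀ m ∈ x :: t, 1 ≤ m ∧ m ≤ 12 := fun m hm => hb m ((hmem m).1 hm)
  rw [hst]
  -- A side: fold over indices → fold over gaps → pvAux
  rw [pv_afold_eq]
  rw [PySem.List.pyGetD_zero_cons, PySem.List.pyGetD_neg_one (x :: t) 0 (List.cons_ne_nil x t)]
  have hc2 : (if 12 - (x :: t).getLast (List.cons_ne_nil x t) > (if x - 1 > 0 then x - 1 else 0)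
        then 12 - (x :: t).getLast (List.cons_ne_nil x t) else (if x - 1 > 0 then x - 1 else 0))
      = max (if x - 1 > 0 then x - 1 else 0) (12 - (x :: t).getLast (List.cons_ne_nil x t)) := by
    omega
  rw [hc2, pv_gapfold_eq]
  -- B side: sweep → pvSW of the stripped sorted list
  rw [pv_sweep_spec 12 1 0 0 (pvStrip x t)
        (fun m => PySem.Set.contains (PySem.Set.ofList months) m)
        (by decide) (by norm_num) le_rfl le_rfl
        (pv_pairwise_strip t x hpw)
        (by intro m hm
            have := hb' m ((pv_mem_strip t x m).1 hm)
            omega)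
        (by intro m _ _
            rw [pv_contains_ofList, ← hmem, pv_mem_strip])]
  obtain ⟨w, hw⟩ := pvStrip_cons t x
  rw [hw, pvSW_closed]
  have haux : pvAux (x :: t) = pvAux (x :: w) := by
    rw [← hw]
    exact pvAux_strip t x hpw (fun m hm => (hb' m hm).2)
  rw [haux]
  omega

-- ===== VERDICT (by name: the statement is the Claim_ definition above) =====
theorem calc_num_defaults_spec : Claim_equal_calc_num_defaults := by
  intro record _dom pre
  obtain ⟨key, months⟩ := record
  unfold Spec_calc_num_defaults
  by_cases h : months.length ≤ 8
  · exact (pv_easy key months h).symm ▸ rfl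
  · exact (pv_hard key months (by omega) (pre (show 9 ≤ months.length by omega))).symm ▸ rfl
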